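-- pv_equiv track=rewrite | github.com/gloridas75/ngrsserver08 | context/engine/config_optimizer_v3.py | distribute_offsets_evenly
-- ===== SOURCE A (Python) =====
-- from typing import List, Dict, Any, Tuple, Optional
--
-- def distribute_offsets_evenly(num_employees: int, cycle_length: int) -> List[int]:
--     """
--     Distribute N employees across rotation offsets as evenly as possible.
--
--     Strategy:
--     - If N <= cycle_length: Use offsets [0, 1, 2, ..., N-1]
--     - If N > cycle_length: Some offsets get multiple employees
--
--     Examples:
--     - 5 employees, 6-day cycle → [0, 1, 2, 3, 4]
--     - 14 employees, 5-day cycle → [0,0,0, 1,1,1, 2,2,2, 3,3, 4,4]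
--     - 6 employees, 12-day cycle → [0, 1, 2, 3, 4, 5]
--
--     Args:
--         num_employees: Total number of employees to distribute
--         cycle_length: Length of rotation cycle
--
--     Returns:
--         List of offsets (one per employee)
--     """
--     if num_employees <= cycle_length:
--         # Simple case: one employee per offset (or fewer)
--         return list(range(num_employees))
--
--     # Need to assign multiple employees to same offsets
--     employees_per_offset = num_employees // cycle_length
--     extra_employees = num_employees % cycle_length
--
--     offsets = []
--     for offset in range(cycle_length):
--         # First 'extra_employees' offsets get one extra employee
--         count = employees_per_offset + (1 if offset < extra_employees else 0)
--         offsets.extend([offset] * count)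
--
--     return offsets
-- ===== SOURCE B (Python) =====
-- def distribute_offsets_evenly(num_employees: int, cycle_length: int) -> list:
--     if num_employees <= cycle_length:
--         return list(range(num_employees))
--     if cycle_length <= 0:
--         return []
--     base = num_employees // cycle_length
--     extra = num_employees % cycle_length
--     cut = extra * (base + 1)
--     return [i // (base + 1) if i < cut else extra + (i - cut) // base
--             for i in range(num_employees)]
-- ===== Notes on version B (the rewrite author's own statement) =====
-- stated objective: alternative
-- what changed: Replaces the per-offset loop that extends the output with replicated blocks by a single per-employee comprehension computing each employee's offset with a closed-form index formula (i//(base+1) before the cutoff, extra+(i-cut)//base after).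
import Mathlib
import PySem

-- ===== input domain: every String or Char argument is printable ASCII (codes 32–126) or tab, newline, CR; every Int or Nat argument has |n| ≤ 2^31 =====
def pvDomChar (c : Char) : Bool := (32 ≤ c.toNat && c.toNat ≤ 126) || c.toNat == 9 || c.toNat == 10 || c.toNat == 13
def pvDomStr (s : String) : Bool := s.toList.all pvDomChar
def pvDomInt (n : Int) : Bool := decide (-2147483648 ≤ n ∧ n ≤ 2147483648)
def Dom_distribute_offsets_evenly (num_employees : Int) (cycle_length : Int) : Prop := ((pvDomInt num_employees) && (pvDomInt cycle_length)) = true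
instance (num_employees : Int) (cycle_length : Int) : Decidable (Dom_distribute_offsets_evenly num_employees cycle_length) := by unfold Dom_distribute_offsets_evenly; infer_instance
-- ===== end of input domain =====

-- B replaces A's per-offset extend loop by a per-employee closed-form offset formula (alternative decomposition, same cost).

-- ===== PORT A =====
def distribute_offsets_evenly (num_employees : Int) (cycle_length : Int) : List Int :=
  if num_employees ≤ cycle_length then
    PySem.List.pyRange 0 num_employees 1
  else
    let employees_per_offset := PySem.Int.floordiv num_employees cycle_length
    let extra_employees := PySem.Int.mod num_employees cycle_length
    (PySem.List.pyRange 0 cycle_length 1).foldl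
      (fun offsets offset =>
        let count := employees_per_offset + (if offset < extra_employees then 1 else 0)
        offsets ++ PySem.List.pyRepeat [offset] count)
      []

-- ===== PORT B =====
def distribute_offsets_evenly_alt (num_employees : Int) (cycle_length : Int) : List Int :=
  if num_employees ≤ cycle_length then
    PySem.List.pyRange 0 num_employees 1
  else if cycle_length ≤ 0 then
    []
  else
    let base := PySem.Int.floordiv num_employees cycle_length
    let extra := PySem.Int.mod num_employees cycle_length
    let cut := extra * (base + 1)
    (PySem.List.pyRange 0 num_employees 1).map
      (fun i =>
        if i < cut then PySem.Int.floordiv i (base + 1)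
        else extra + PySem.Int.floordiv (i - cut) base)

-- ===== PRECONDITION & SPEC =====
-- Pre_ excludes exactly cycle_length = 0 with num_employees > 0, where A raises ZeroDivisionError.
def Pre_distribute_offsets_evenly (num_employees : Int) (cycle_length : Int) : Prop :=
  ¬ (cycle_length = 0 ∧ 0 < num_employees)
instance (num_employees : Int) (cycle_length : Int) : Decidable (Pre_distribute_offsets_evenly num_employees cycle_length) := by unfold Pre_distribute_offsets_evenly; infer_instance

def pvWitness_distribute_offsets_evenly : Int × Int := (14, 5)

def Spec_distribute_offsets_evenly (num_employees : Int) (cycle_length : Int) (out : List Int) : Prop := out = distribute_offsets_evenly_alt num_employees cycle_length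
instance (num_employees : Int) (cycle_length : Int) (out : List Int) : Decidable (Spec_distribute_offsets_evenly num_employees cycle_length out) := by unfold Spec_distribute_offsets_evenly; infer_instance

-- ===== CLAIM (what is proved, stated in full; the proofs are below) =====
def Claim_equal_distribute_offsets_evenly : Prop := ∀ (num_employees : Int) (cycle_length : Int), Dom_distribute_offsets_evenly num_employees cycle_length → Pre_distribute_offsets_evenly num_employees cycle_length → Spec_distribute_offsets_evenly num_employees cycle_length (distribute_offsets_evenly num_employees cycle_length)

-- ===== LEMMAS AND PROOFS =====

-- A run of k consecutive offsets, each repeated d times, equals the map of a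
-- floor-division index formula over the corresponding run of employee indices.
theorem pv_block (d s : Int) (hd : 0 < d) :
    ∀ (k : Nat) (a : Int) (g : Int → List Int) (f : Int → Int),
      (∀ o, a ≤ o → o < a + k → g o = List.replicate d.toNat o) →
      (∀ i, a * d + s ≤ i → i < (a + k) * d + s → f i = PySem.Int.floordiv (i - s) d) →
      (PySem.List.pyRange a (a + k) 1).flatMap g
        = (PySem.List.pyRange (a * d + s) ((a + k) * d + s) 1).map f := by
  intro k
  induction k with
  | zero =>
      intro a g f _ _
      rw [PySem.List.pyRange_one_eq_nil (by simp), PySem.List.pyRange_one_eq_nil (by simp)]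
      simp
  | succ k ih =>
      intro a g f hg hf
      have hlt : a < a + ((k : Nat) + 1 : Nat) := by push_cast; omega
      rw [PySem.List.pyRange_one_cons hlt]
      have hsplit : PySem.List.pyRange (a * d + s) ((a + ((k : Nat) + 1 : Nat)) * d + s) 1
          = PySem.List.pyRange (a * d + s) ((a + 1) * d + s) 1
            ++ PySem.List.pyRange ((a + 1) * d + s) ((a + ((k : Nat) + 1 : Nat)) * d + s) 1 := by
        apply PySem.List.pyRange_one_append
        · nlinarith
        · have : (a + 1) ≤ a + ((k : Nat) + 1 : Nat) := by push_cast; omega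
          nlinarith
      rw [hsplit, List.flatMap_cons, List.map_append]
      have hfirst : (PySem.List.pyRange (a * d + s) ((a + 1) * d + s) 1).map f
          = List.replicate d.toNat a := by
        rw [List.eq_replicate_iff]
        constructor
        · rw [List.length_map, PySem.List.length_pyRange_one]
          have : (a + 1) * d + s - (a * d + s) = d := by ring
          rw [this]
        · intro b hb
          rcases List.mem_map.mp hb with ⟨i, hi, rfl⟩
          rw [PySem.List.mem_pyRange_one] at hi
          rw [hf i hi.1 (by nlinarith [hi.2])]
          rw [PySem.Int.floordiv_eq_iff_of_pos hd]
          constructor <;> nlinarith [hi.1, hi.2]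
      have hrest : (PySem.List.pyRange (a + 1) (a + ((k : Nat) + 1 : Nat)) 1).flatMap g
          = (PySem.List.pyRange ((a + 1) * d + s) ((a + ((k : Nat) + 1 : Nat)) * d + s) 1).map f := by
        have heq : a + ((k : Nat) + 1 : Nat) = (a + 1) + (k : Nat) := by push_cast; omega
        rw [heq]
        exact ih (a + 1) g f
          (fun o h1 h2 => hg o (by omega) (by omega))
          (fun i h1 h2 => hf i (by nlinarith) (by
            have : ((a + 1) + (k : Nat)) * d + s = (a + ((k : Nat) + 1 : Nat)) * d + s := by
              push_cast; ring
            omega))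
      rw [hrest, hg a (le_refl a) hlt, hfirst]

-- The main equivalence.
theorem pv_main (n c : Int) :
    distribute_offsets_evenly n c = distribute_offsets_evenly_alt n c := by
  unfold distribute_offsets_evenly distribute_offsets_evenly_alt
  by_cases hnc : n ≤ c
  · simp [hnc]
  · simp only [hnc, if_false]
    by_cases hc : c ≤ 0
    · rw [if_pos hc, PySem.List.pyRange_one_eq_nil hc]
      simp
    · rw [if_neg hc]
      rw [not_le] at hc hnc
      set B := PySem.Int.floordiv n c with hB
      set E := PySem.Int.mod n c with hE
      have hBE : B * c + E = n := PySem.Int.floordiv_mul_add_mod n c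
      have hE0 : 0 ≤ E := PySem.Int.mod_nonneg (a := n) hc
      have hEc : E < c := PySem.Int.mod_lt (a := n) hc
      have hB1 : 1 ≤ B := by nlinarith
      -- turn A's foldl into a flatMap
      rw [PySem.List.foldl_append_eq_flatMap]
      rw [List.nil_append]
      -- split A's offsets at E and B's indices at cut := E * (B + 1)
      have hsplitA : PySem.List.pyRange 0 c 1
          = PySem.List.pyRange 0 E 1 ++ PySem.List.pyRange E c 1 :=
        PySem.List.pyRange_one_append 0 E c hE0 (le_of_lt hEc)
      have hcut_n : E * (B + 1) ≤ n := by nlinarith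
      have hsplitB : PySem.List.pyRange 0 n 1
          = PySem.List.pyRange 0 (E * (B + 1)) 1 ++ PySem.List.pyRange (E * (B + 1)) n 1 :=
        PySem.List.pyRange_one_append 0 (E * (B + 1)) n (by positivity) hcut_n
      rw [hsplitA, hsplitB, List.flatMap_append, List.map_append]
      congr 1
      · -- offsets below E (each B+1 employees) ↔ indices below cut
        have h1 := pv_block (B + 1) 0 (by omega) E.toNat 0
          (fun offset => PySem.List.pyRepeat [offset] (B + if offset < E then 1 else 0))
          (fun i => if i < E * (B + 1) then PySem.Int.floordiv i (B + 1)
                    else E + PySem.Int.floordiv (i - E * (B + 1)) B)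
          (by
            intro o h1 h2
            have hoE : o < E := by omega
            simp only [PySem.List.pyRepeat_singleton, hoE, if_true])
          (by
            intro i h1 h2
            have hiE : i < E * (B + 1) := by
              have : (0 + (E.toNat : Int)) * (B + 1) + 0 = E * (B + 1) := by
                rw [Int.toNat_of_nonneg hE0]; ring
              omega
            simp only [hiE, if_true, sub_zero])
        rw [Int.toNat_of_nonneg hE0] at h1
        simpa using h1
      · -- offsets from E to c (each B employees) ↔ indices from cut to n
        have hk : E + ((c - E).toNat : Int) = c := by omega
        have h2 := pv_block B E hB1 (c - E).toNat E
          (fun offset => PySem.List.pyRepeat [offset] (B + if offset < E then 1 else 0))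
          (fun i => if i < E * (B + 1) then PySem.Int.floordiv i (B + 1)
                    else E + PySem.Int.floordiv (i - E * (B + 1)) B)
          (by
            intro o h1 h2
            have hoE : ¬ o < E := by omega
            simp only [PySem.List.pyRepeat_singleton, hoE, if_false, add_zero])
          (by
            intro i hlo hhi
            have hge : ¬ i < E * (B + 1) := by nlinarith
            simp only [hge, if_false]
            -- E + (i - E*(B+1)) // B = (i - E) // B
            have hstep : E + PySem.Int.floordiv (i - E * (B + 1)) B
                = PySem.Int.floordiv (i - E) B := by
              rw [PySem.Int.floordiv_eq_ediv_of_pos (by omega : (0:Int) < B),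
                  PySem.Int.floordiv_eq_ediv_of_pos (by omega : (0:Int) < B)]
              have harg : i - E = (i - E * (B + 1)) + E * B := by ring
              rw [harg, Int.add_mul_ediv_right _ _ (by omega : B ≠ 0)]
              ring
            exact hstep)
        rw [hk] at h2
        have hend : c * B + E = n := by linarith [hBE]
        have hstart : E * B + E = E * (B + 1) := by ring
        rw [hstart, hend] at h2
        exact h2

-- ===== VERDICT (by name: the statement is the Claim_ definition above) =====
theorem distribute_offsets_evenly_spec : Claim_equal_distribute_offsets_evenly := by
  intro n c _ _
  exact pv_main n c
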